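-- pv_equiv track=rewrite | github.com/kim-byoungkwan/CodingTest_final | 백준/백준_2484_구현_ebiz_B2.py | dice_calculator
-- ===== SOURCE A (Python) =====
-- def dice_calculator(a,b,c,d):
--
--     result = [a,b,c,d]
--
--     dict = {}
--
--     box = []
--
--     box_value = []
--
--     box_key = []
--
--     for i in result:
--
--         dict[i] = dict.get(i,0) + 1
--
--     dict_value = list(dict.values())
--
--     if max(dict_value) == 1:
--
--         dict_sorted_key = sorted(dict.items(),key= lambda x: x[0], reverse=True)
--
--         for key,value in dict_sorted_key:
--
--             box.append((key)*100)
--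
--             break
--
--     else:
--
--         dict_sorted_value = sorted(dict.items(),key= lambda x:x[1],reverse=True)
--
--         for key,value in dict_sorted_value:
--
--             box_value.append(value)
--
--             box_key.append(key)
--
--         for key, value in dict_sorted_value:
--
--             if value == 4:
--
--                 box.append(50000+(key)*5000)
--
--                 break
--
--             elif value == 3:
--
--                 box.append(10000+(key)*1000)
--
--                 break
--
--             elif value == 2 and box_value.count(2) == 2:
--
--                 box.append(1000+key*500)
--
--                 continue
--
--             elif value == 2 and box_value.count(1) == 2:
--
--                 box.append(1000+key*100)
--
--                 break
--
--     final = sum(box)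
--
--     return final
-- ===== SOURCE B (Python) =====
-- def dice_calculator(a, b, c, d):
--     s = sorted([a, b, c, d])
--     if s[0] == s[3]:                      # four of a kind
--         return 50000 + s[0] * 5000
--     if s[0] == s[2] or s[1] == s[3]:      # three of a kind (middle element is the triple)
--         return 10000 + s[1] * 1000
--     if s[0] == s[1] and s[2] == s[3]:     # two pairs (A adds 1000+k*500 for each pair)
--         return 2000 + (s[0] + s[2]) * 500
--     if s[0] == s[1] or s[1] == s[2] or s[2] == s[3]:   # one pair
--         p = s[1] if s[0] == s[1] or s[1] == s[2] else s[2]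
--         return 1000 + p * 100
--     return s[3] * 100                     # all distinct
-- ===== Notes on version B (the rewrite author's own statement) =====
-- stated objective: simpler
-- what changed: A builds a frequency dict, takes max of its counts, runs two comparator sorts and a break/continue loop with list.count tests; B sorts the four dice once and reads the prize off adjacent-equality patterns of the sorted quadruple (reproducing A's 2000+(p+q)*500 two-pair total exactly).
import Mathlib
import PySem

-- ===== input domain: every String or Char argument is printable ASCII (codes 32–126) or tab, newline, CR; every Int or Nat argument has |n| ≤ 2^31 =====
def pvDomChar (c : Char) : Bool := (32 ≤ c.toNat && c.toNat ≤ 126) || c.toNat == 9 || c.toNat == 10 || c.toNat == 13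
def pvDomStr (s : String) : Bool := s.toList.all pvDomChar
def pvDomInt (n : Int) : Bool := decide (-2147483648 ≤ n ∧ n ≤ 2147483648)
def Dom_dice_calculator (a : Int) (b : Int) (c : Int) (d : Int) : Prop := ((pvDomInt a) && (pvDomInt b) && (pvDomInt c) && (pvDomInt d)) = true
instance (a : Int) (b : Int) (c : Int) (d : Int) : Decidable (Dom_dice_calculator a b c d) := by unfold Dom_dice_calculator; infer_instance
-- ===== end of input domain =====

-- B replaces A's counting dict and two comparator sorts by one sort of the four dice
-- and adjacent-equality pattern tests (objective: simpler; same exact values,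
-- including A's 2000+(p+q)*500 total on two pairs).

-- ===== PORT A =====
-- the second for-loop over dict_sorted_value with its break/continue pattern
def loopA (box_value : List Int) : List (Int × Int) → List Int
  | [] => []
  | (key, value) :: rest =>
    if value = 4 then [50000 + key * 5000]
    else if value = 3 then [10000 + key * 1000]
    else if value = 2 ∧ box_value.count 2 = 2 then (1000 + key * 500) :: loopA box_value rest
    else if value = 2 ∧ box_value.count 1 = 2 then [1000 + key * 100]
    else loopA box_value rest

def dice_calculator (a : Int) (b : Int) (c : Int) (d : Int) : Int :=
  let result : List Int := [a, b, c, d]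
  let dct : PySem.Dict Int Int :=
    result.foldl (fun dct i => dct.insert i (dct.getD i 0 + 1)) PySem.Dict.empty
  let dict_value := dct.values
  -- max(dict_value): dict_value is never empty (result has 4 elements), so getD 0 is exact
  if (PySem.List.max? dict_value (fun x => x)).getD 0 = 1 then
    -- for key,value in dict_sorted_key: box.append(key*100); break
    match PySem.List.sorted dct.items (fun x => x.1) true with
    | [] => 0
    | (key, _) :: _ => ([key * 100] : List Int).sum
  else
    let dsv := PySem.List.sorted dct.items (fun x => x.2) true
    let box_value := dsv.map (fun p => p.2)   -- the first loop fills box_value (box_key unused)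
    (loopA box_value dsv).sum

-- ===== PORT B =====
def dice_calculator_alt (a : Int) (b : Int) (c : Int) (d : Int) : Int :=
  match PySem.List.sorted [a, b, c, d] (fun x => x) false with
  | [s0, s1, s2, s3] =>
    if s0 = s3 then 50000 + s0 * 5000
    else if s0 = s2 ∨ s1 = s3 then 10000 + s1 * 1000
    else if s0 = s1 ∧ s2 = s3 then 2000 + (s0 + s2) * 500
    else if s0 = s1 ∨ s1 = s2 ∨ s2 = s3 then
      1000 + (if s0 = s1 ∨ s1 = s2 then s1 else s2) * 100
    else s3 * 100
  | _ => 0   -- unreachable: the sorted list always has 4 elements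

-- ===== PRECONDITION & SPEC =====
def Spec_dice_calculator (a : Int) (b : Int) (c : Int) (d : Int) (out : Int) : Prop := out = dice_calculator_alt a b c d
instance (a : Int) (b : Int) (c : Int) (d : Int) (out : Int) : Decidable (Spec_dice_calculator a b c d out) := by unfold Spec_dice_calculator; infer_instance

-- ===== CLAIM (what is proved, stated in full; the proofs are below) =====
def Claim_equal_dice_calculator : Prop := ∀ (a : Int) (b : Int) (c : Int) (d : Int), Dom_dice_calculator a b c d → Spec_dice_calculator a b c d (dice_calculator a b c d)

-- ===== LEMMAS AND PROOFS =====
-- Total case analysis on the order/equality pattern of the four dice; in each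
-- consistent branch both ports evaluate symbolically to the same linear expression.
set_option maxHeartbeats 4000000 in
theorem dice_calculator_eq_alt (a b c d : Int) :
    dice_calculator a b c d = dice_calculator_alt a b c d := by
  rcases lt_trichotomy a b with hab|hab|hab <;>
  rcases lt_trichotomy a c with hac|hac|hac <;>
  rcases lt_trichotomy a d with had|had|had <;>
  rcases lt_trichotomy b c with hbc|hbc|hbc <;>
  rcases lt_trichotomy b d with hbd|hbd|hbd <;>
  rcases lt_trichotomy c d with hcd|hcd|hcd <;>
  first
    | omega
    | (try have h1 := hab.ne; try have h2 := hab.ne'; try have h3 := hab.not_gt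
       try have h4 := hac.ne; try have h5 := hac.ne'; try have h6 := hac.not_gt
       try have h7 := had.ne; try have h8 := had.ne'; try have h9 := had.not_gt
       try have h10 := hbc.ne; try have h11 := hbc.ne'; try have h12 := hbc.not_gt
       try have h13 := hbd.ne; try have h14 := hbd.ne'; try have h15 := hbd.not_gt
       try have h16 := hcd.ne; try have h17 := hcd.ne'; try have h18 := hcd.not_gt
       simp [dice_calculator, dice_calculator_alt, loopA, PySem.Dict.insert,
         PySem.Dict.getD, PySem.Dict.get?, PySem.Dict.empty, PySem.Dict.contains,
         PySem.Dict.items, PySem.Dict.values, PySem.List.sorted, PySem.List.insertBy,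
         PySem.List.max?, *]
       try omega)

-- ===== VERDICT (by name: the statement is the Claim_ definition above) =====
theorem dice_calculator_spec : Claim_equal_dice_calculator := by
  intro a b c d _
  unfold Spec_dice_calculator
  exact dice_calculator_eq_alt a b c d
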